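-- pv_equiv track=rewrite | github.com/km1994/leetcode | interview/meituan_interview/interview_1.py | remove_num
-- ===== SOURCE A (Python) =====
-- def remove_num(n,x,nums):
--     nums = sorted(nums)
--     if nums[n-1]-nums[0] <=x:
--         return 0
--     best_n = n
--
--     for i in range(0,n):
--         for j in range(i+1,n):
--             if nums[j] - nums[i] > x and best_n > n-j+i:
--                 best_n =  n-j+i+1
--                 break
--     return best_n
-- ===== SOURCE B (Python) =====
-- def remove_num(n, x, nums):
--     s = sorted(nums)
--     if s[n - 1] - s[0] <= x:
--         return 0
--     best = n
--     for i in range(n):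
--         # binary search: first j in (i, n) with s[j] - s[i] > x
--         lo, hi = i + 1, n
--         while lo < hi:
--             mid = (lo + hi) // 2
--             if s[mid] - s[i] > x:
--                 hi = mid
--             else:
--                 lo = mid + 1
--         if lo < n:
--             best = min(best, n - lo + i + 1)
--     return best
-- ===== Notes on version B (the rewrite author's own statement) =====
-- stated objective: faster
-- what changed: A scans j linearly from i+1 for each i (with a subtle break/update rule); B binary-searches the sorted list for the first index whose gap to nums[i] exceeds x and takes min(best, n-j+i+1), one O(log n) search per i.
import Mathlib
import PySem

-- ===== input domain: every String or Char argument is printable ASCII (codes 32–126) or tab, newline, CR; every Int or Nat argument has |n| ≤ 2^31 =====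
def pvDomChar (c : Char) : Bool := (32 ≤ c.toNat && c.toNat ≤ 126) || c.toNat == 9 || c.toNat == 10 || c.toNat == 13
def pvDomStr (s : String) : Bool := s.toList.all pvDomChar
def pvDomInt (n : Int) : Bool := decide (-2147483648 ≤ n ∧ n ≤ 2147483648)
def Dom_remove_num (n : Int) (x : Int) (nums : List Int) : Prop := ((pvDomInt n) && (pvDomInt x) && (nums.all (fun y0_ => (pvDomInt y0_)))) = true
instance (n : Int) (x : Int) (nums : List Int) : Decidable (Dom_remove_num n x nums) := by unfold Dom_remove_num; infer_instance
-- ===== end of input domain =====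

-- B replaces A's inner linear scan by a binary search on the sorted list for the first
-- index whose gap exceeds x (O(n log n) instead of O(n^2) after sorting).

-- shared index helper: s[j] (Python indexing; default unreachable under Pre_)
def pvGet (s : List Int) (j : Int) : Int := (PySem.List.pyGet? s j).getD 0

-- ===== PORT A =====
-- inner 'for j in range(i+1, n): if …: best_n = …; break'
def innerA (s : List Int) (x n i : Int) : List Int → Int → Int
  | [], best => best
  | j :: rest, best =>
    if pvGet s j - pvGet s i > x ∧ best > n - j + i then n - j + i + 1
    else innerA s x n i rest best

def remove_num (n : Int) (x : Int) (nums : List Int) : Int :=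
  let s := PySem.List.sorted nums (fun v => v) false
  if pvGet s (n - 1) - pvGet s 0 ≤ x then 0
  else
    (PySem.List.pyRange 0 n 1).foldl
      (fun best i => innerA s x n i (PySem.List.pyRange (i + 1) n 1) best) n

-- ===== PORT B =====
-- 'while lo < hi: mid = (lo+hi)//2; …' binary search
def bsearchB (s : List Int) (x i : Int) (lo hi : Int) : Int :=
  if h : lo < hi then
    let mid := PySem.Int.floordiv (lo + hi) 2
    if pvGet s mid - pvGet s i > x then bsearchB s x i lo mid
    else bsearchB s x i (mid + 1) hi
  else lo
termination_by (hi - lo).toNat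
decreasing_by
  · have := PySem.Int.floordiv_two_mid_bounds (lo := lo) (hi := hi) (le_of_lt h)
    have h2 : PySem.Int.floordiv (lo + hi) 2 < hi := by
      rw [PySem.Int.floordiv_lt_iff_lt_mul (by omega)]; omega
    omega
  · have := PySem.Int.floordiv_two_mid_bounds (lo := lo) (hi := hi) (le_of_lt h)
    omega

def remove_num_alt (n : Int) (x : Int) (nums : List Int) : Int :=
  let s := PySem.List.sorted nums (fun v => v) false
  if pvGet s (n - 1) - pvGet s 0 ≤ x then 0
  else
    (PySem.List.pyRange 0 n 1).foldl
      (fun best i =>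
        let lo := bsearchB s x i (i + 1) n
        if lo < n then min best (n - lo + i + 1) else best) n

-- ===== PRECONDITION & SPEC =====
-- Pre_ is exactly where the Python A returns: all indexing (including the negative
-- index nums[n-1] for n ≤ 0) stays in range; outside it A raises IndexError.
def Pre_remove_num (n : Int) (x : Int) (nums : List Int) : Prop :=
  nums ≠ [] ∧ 1 - (nums.length : Int) ≤ n ∧ n ≤ (nums.length : Int)
instance (n : Int) (x : Int) (nums : List Int) : Decidable (Pre_remove_num n x nums) := by
  unfold Pre_remove_num; infer_instance

def pvWitness_remove_num : Int × Int × List Int := (4, 1, [5, 1, 9, 2])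

def Spec_remove_num (n : Int) (x : Int) (nums : List Int) (out : Int) : Prop := out = remove_num_alt n x nums
instance (n : Int) (x : Int) (nums : List Int) (out : Int) : Decidable (Spec_remove_num n x nums out) := by unfold Spec_remove_num; infer_instance

-- ===== CLAIM (what is proved, stated in full; the proofs are below) =====
def Claim_equal_remove_num : Prop := ∀ (n : Int) (x : Int) (nums : List Int), Dom_remove_num n x nums → Pre_remove_num n x nums → Spec_remove_num n x nums (remove_num n x nums)

-- ===== LEMMAS AND PROOFS =====

-- linear scan for the first j in [lo, hi) with s[j] - s[i] > x (hi if none); proof-only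
def lfind (s : List Int) (x i hi : Int) (lo : Int) : Int :=
  if _h : lo < hi then
    if pvGet s lo - pvGet s i > x then lo else lfind s x i hi (lo + 1)
  else hi
termination_by (hi - lo).toNat

theorem lfind_ge (s : List Int) (x i hi : Int) (lo : Int) (h : lo ≤ hi) :
    lo ≤ lfind s x i hi lo := by
  rw [lfind]
  split
  · split
    · omega
    · have := lfind_ge s x i hi (lo + 1) (by omega)
      omega
  · omega
termination_by (hi - lo).toNat
decreasing_by omega



-- A's inner loop computes min best (n - f + i + 1) where f is the first hit
-- (needs the hit predicate to be upward closed, which sortedness provides)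
theorem innerA_eq_lfind (s : List Int) (x n i : Int)
    (hmono : ∀ a b : Int, 0 ≤ a → a ≤ b → b < n →
      pvGet s a - pvGet s i > x → pvGet s b - pvGet s i > x) :
    ∀ (j0 : Int), ∀ best, 0 ≤ j0 → j0 ≤ n →
      innerA s x n i (PySem.List.pyRange j0 n 1) best =
        (if lfind s x i n j0 < n then min best (n - lfind s x i n j0 + i + 1) else best) := by
  intro j0 best h0 h
  by_cases hlt : j0 < n
  · rw [PySem.List.pyRange_one_cons hlt, innerA]
    conv_rhs => rw [lfind]
    rw [dif_pos hlt]
    by_cases hP : pvGet s j0 - pvGet s i > x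
    · rw [if_pos hP]
      by_cases hb : best > n - j0 + i
      · rw [if_pos ⟨hP, hb⟩, if_pos hlt]
        omega
      · rw [if_neg (by tauto)]
        rw [innerA_eq_lfind s x n i hmono (j0 + 1) best (by omega) (by omega)]
        by_cases hn1 : j0 + 1 < n
        · have hf : lfind s x i n (j0 + 1) = j0 + 1 := by
            rw [lfind, dif_pos hn1, if_pos (hmono j0 (j0 + 1) h0 (by omega) hn1 hP)]
          rw [hf, if_pos hn1, if_pos hlt]
          omega
        · have hf : lfind s x i n (j0 + 1) = n := by
            rw [lfind, dif_neg hn1]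
          rw [hf, if_neg (by omega), if_pos hlt]
          omega
    · rw [if_neg (by tauto), if_neg hP]
      exact innerA_eq_lfind s x n i hmono (j0 + 1) best (by omega) (by omega)
  · rw [PySem.List.pyRange_one_eq_nil (by omega), innerA]
    rw [lfind, dif_neg hlt, if_neg (by omega)]
termination_by j0 => (n - j0).toNat
decreasing_by all_goals omega

-- capping lfind at a known hit m does not change the result
theorem lfind_cap (s : List Int) (x i hi : Int) (m : Int)
    (hm : pvGet s m - pvGet s i > x) (h2 : m ≤ hi) :
    ∀ lo, lo ≤ m → lfind s x i hi lo = lfind s x i m lo := by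
  intro lo hlo
  by_cases hlt : lo < m
  · conv_lhs => rw [lfind]
    conv_rhs => rw [lfind]
    rw [dif_pos (show lo < hi by omega), dif_pos hlt]
    by_cases hP : pvGet s lo - pvGet s i > x
    · rw [if_pos hP, if_pos hP]
    · rw [if_neg hP, if_neg hP]
      exact lfind_cap s x i hi m hm h2 (lo + 1) (by omega)
  · have heq : lo = m := by omega
    subst heq
    conv_rhs => rw [lfind]
    rw [dif_neg (by omega)]
    by_cases hhi : lo < hi
    · rw [lfind, dif_pos hhi, if_pos hm]
    · rw [lfind, dif_neg hhi]; omega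
termination_by lo => (m - lo).toNat
decreasing_by omega

-- skipping a known-miss prefix does not change the result
theorem lfind_skip (s : List Int) (x i hi : Int) (m : Int) (h2 : m ≤ hi) :
    ∀ lo, lo ≤ m → (∀ j, lo ≤ j → j < m → ¬ (pvGet s j - pvGet s i > x)) →
      lfind s x i hi lo = lfind s x i hi m := by
  intro lo hlo hmiss
  by_cases hlt : lo < m
  · conv_lhs => rw [lfind]
    rw [dif_pos (by omega), if_neg (hmiss lo (le_refl lo) hlt)]
    exact lfind_skip s x i hi m h2 (lo + 1) (by omega)
      (fun j h1 h2' => hmiss j (by omega) h2')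
  · have heq : lo = m := by omega
    rw [heq]
termination_by lo => (m - lo).toNat
decreasing_by omega

-- binary search agrees with the linear scan on a monotone predicate
theorem bsearchB_eq_lfind (s : List Int) (x i n : Int)
    (hmono : ∀ a b : Int, 0 ≤ a → a ≤ b → b < n →
      pvGet s a - pvGet s i > x → pvGet s b - pvGet s i > x) :
    ∀ lo hi, 0 ≤ lo → lo ≤ hi → hi ≤ n → bsearchB s x i lo hi = lfind s x i hi lo := by
  intro lo hi h0 hlh hhn
  rw [bsearchB]
  by_cases h : lo < hi
  · rw [dif_pos h]
    have hmid := PySem.Int.floordiv_two_mid_bounds (lo := lo) (hi := hi) (le_of_lt h)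
    have hmidlt : PySem.Int.floordiv (lo + hi) 2 < hi := by
      rw [PySem.Int.floordiv_lt_iff_lt_mul (by omega)]; omega
    set mid := PySem.Int.floordiv (lo + hi) 2 with hmiddef
    by_cases hP : pvGet s mid - pvGet s i > x
    · rw [if_pos hP, bsearchB_eq_lfind s x i n hmono lo mid h0 (by omega) (by omega)]
      exact (lfind_cap s x i hi mid hP (by omega) lo (by omega)).symm
    · rw [if_neg hP, bsearchB_eq_lfind s x i n hmono (mid + 1) hi (by omega) (by omega) hhn]
      refine (lfind_skip s x i hi (mid + 1) (by omega) lo (by omega) ?_).symm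
      intro j hj1 hj2 hPj
      exact hP (hmono j mid (by omega) (by omega) (by omega) hPj)
  · rw [dif_neg h, lfind, dif_neg h]
    omega
termination_by lo hi => (hi - lo).toNat
decreasing_by all_goals omega

-- the sorted list is pointwise monotone under pvGet
theorem pvGet_sorted_mono (nums : List Int) (n : Int)
    (hn : n ≤ (nums.length : Int)) (a b : Int) (ha : 0 ≤ a) (hab : a ≤ b) (hb : b < n) :
    pvGet (PySem.List.sorted nums (fun v => v) false) a ≤
      pvGet (PySem.List.sorted nums (fun v => v) false) b := by
  have hlen : (PySem.List.sorted nums (fun v => v) false).length = nums.length :=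
    PySem.List.length_sorted nums (fun v => v) false
  unfold pvGet
  rw [PySem.List.pyGet?_eq_some_getElem _ (by omega) (by omega),
      PySem.List.pyGet?_eq_some_getElem _ (by omega) (by omega)]
  exact PySem.List.key_sorted_getElem_mono nums (fun v => v)
    (p := a.toNat) (q := b.toNat) (by omega) (by omega)

-- ===== VERDICT (by name: the statement is the Claim_ definition above) =====
theorem remove_num_spec : Claim_equal_remove_num := by
  intro n x nums _hdom hpre
  obtain ⟨hne, h1, h2⟩ := hpre
  unfold Spec_remove_num remove_num remove_num_alt
  dsimp only
  split
  · rfl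
  · refine PySem.List.foldl_congr_mem _ _ _ _ ?_
    intro best i hi
    rw [PySem.List.mem_pyRange_one] at hi
    have hmono := fun a b ha hab hb =>
      pvGet_sorted_mono nums n h2 a b ha hab hb
    rw [innerA_eq_lfind _ x n i
          (fun a b ha hab hb hPa => by have := hmono a b ha hab hb; omega)
          (i + 1) best (by omega) (by omega),
        bsearchB_eq_lfind _ x i n
          (fun a b ha hab hb hPa => by have := hmono a b ha hab hb; omega)
          (i + 1) n (by omega) (by omega) (le_refl n)]
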